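-- pv_equiv track=rewrite | github.com/anuragmishra218/Hackerrank | words_score.py | score_words
-- ===== SOURCE A (Python) =====
-- def is_vowel(letter):
--     return letter in ['a', 'e', 'i', 'o', 'u', 'y']
--
-- def score_words(words):
--     score = 0
--     for i in words:
--         count = 0
--         for j in i:
--             if is_vowel(j):
--                 count += 1
--         if count % 2 == 0:
--             score += 2
--         else:
--             score += 1
--
--     return score
-- ===== SOURCE B (Python) =====
-- def score_words(words):
--     vowels = "aeiouy"
--     odd = sum(sum(w.count(v) for v in vowels) % 2 for w in words)
--     return 2 * len(words) - odd
-- ===== Notes on version B (the rewrite author's own statement) =====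
-- stated objective: alternative
-- what changed: Replaces the per-character membership loop and running score accumulator with a per-vowel str.count sum per word and the closed form 2*len(words) - (number of odd-vowel-count words).
import Mathlib
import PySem

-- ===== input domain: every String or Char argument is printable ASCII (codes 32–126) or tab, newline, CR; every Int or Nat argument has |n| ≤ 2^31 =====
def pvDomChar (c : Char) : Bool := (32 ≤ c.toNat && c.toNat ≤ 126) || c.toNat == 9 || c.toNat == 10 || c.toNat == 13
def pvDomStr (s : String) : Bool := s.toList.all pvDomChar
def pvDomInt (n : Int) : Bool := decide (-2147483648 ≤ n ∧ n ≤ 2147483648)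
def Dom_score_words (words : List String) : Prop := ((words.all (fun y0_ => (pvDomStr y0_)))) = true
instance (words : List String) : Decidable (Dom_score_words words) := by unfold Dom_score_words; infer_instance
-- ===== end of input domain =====

-- B replaces A's per-character membership loop and running accumulator with per-vowel
-- substring counts per word and the closed form 2*len - (number of odd-parity words);
-- an alternative decomposition, same asymptotic cost.


-- ===== PORT A =====
def is_vowel (letter : Char) : Bool := ['a', 'e', 'i', 'o', 'u', 'y'].contains letter

def score_words (words : List String) : Int :=
  words.foldl (fun score i =>
    let count : Int := i.toList.foldl (fun count j => if is_vowel j then count + 1 else count) 0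
    if PySem.Int.mod count 2 == 0 then score + 2 else score + 1) 0

-- ===== PORT B =====
-- sum(w.count(v) for v in "aeiouy")
def vowelSum (w : String) : Int :=
  ("aeiouy".toList.map (fun v => (PySem.Str.count w (String.ofList [v]) : Int))).sum

def score_words_alt (words : List String) : Int :=
  2 * (words.length : Int) - (words.map (fun w => PySem.Int.mod (vowelSum w) 2)).sum

-- ===== PRECONDITION & SPEC =====
def Spec_score_words (words : List String) (out : Int) : Prop := out = score_words_alt words
instance (words : List String) (out : Int) : Decidable (Spec_score_words words out) := by unfold Spec_score_words; infer_instance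

-- ===== CLAIM (what is proved, stated in full; the proofs are below) =====
def Claim_equal_score_words : Prop := ∀ (words : List String), Dom_score_words words → Spec_score_words words (score_words words)

-- ===== LEMMAS AND PROOFS =====

-- single-character str.count is List.count
lemma count_go_single (c : Char) : ∀ (fuel : Nat) (l : List Char) (acc : Nat),
    l.length ≤ fuel → PySem.Chars.count.go [c] fuel l acc = acc + l.count c := by
  intro fuel
  induction fuel with
  | zero => intro l acc h; cases l with
    | nil => simp [PySem.Chars.count.go]
    | cons a t => simp at h
  | succ n ih =>
    intro l acc h
    cases l with
    | nil => simp [PySem.Chars.count.go]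
    | cons a t =>
      simp only [List.length_cons, Nat.succ_le_succ_iff] at h
      by_cases hc : c = a
      · subst hc
        simp [PySem.Chars.count.go, List.isPrefixOf, ih t (acc + 1) h]
        omega
      · have hpf : ([c].isPrefixOf (a :: t)) = false := by
          simp [List.isPrefixOf]
          exact fun h' => hc h'
        simp [PySem.Chars.count.go, hpf, ih t acc h, List.count_cons]
        exact fun h' => hc h'.symm

lemma count_single (w : String) (c : Char) :
    PySem.Str.count w (String.ofList [c]) = w.toList.count c := by
  rw [PySem.Str.count_eq]
  have h1 : (String.ofList [c]).toList = [c] := String.toList_ofList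
  rw [h1]
  unfold PySem.Chars.count
  simp only [List.isEmpty_cons, if_false, Bool.false_eq_true]
  rw [count_go_single c w.toList.length w.toList 0 (le_refl _)]
  simp

lemma sum_counts (t : List Char) :
    (['a','e','i','o','u','y'].map (fun v => (t.count v : Int))).sum = (t.countP is_vowel : Int) := by
  induction t with
  | nil => simp
  | cons a t ih =>
    simp only [List.count_cons, List.countP_cons, List.map_cons, List.map_nil,
      List.sum_cons, List.sum_nil] at *
    push_cast at *
    by_cases h : a ∈ ['a','e','i','o','u','y']
    · have hv : is_vowel a = true := by simp [is_vowel, h]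
      rcases (by simpa using h : a = 'a' ∨ a = 'e' ∨ a = 'i' ∨ a = 'o' ∨ a = 'u' ∨ a = 'y')
        with h|h|h|h|h|h <;> subst h <;> simp [hv] <;> linarith [ih]
    · have hv : is_vowel a = false := by simp [is_vowel]; simpa using h
      have e : ∀ v, v ∈ (['a','e','i','o','u','y'] : List Char) → ¬ a = v := by
        intro v hvmem hva; exact h (hva ▸ hvmem)
      simp [hv, e 'a' (by simp), e 'e' (by simp), e 'i' (by simp),
        e 'o' (by simp), e 'u' (by simp), e 'y' (by simp)]
      linarith [ih]

lemma vowelSum_eq (w : String) : vowelSum w = (w.toList.countP is_vowel : Int) := by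
  unfold vowelSum
  have hL : "aeiouy".toList = ['a','e','i','o','u','y'] := rfl
  rw [hL]
  simp only [count_single]
  exact sum_counts w.toList

-- A's loop as a closed sum
lemma score_words_foldl (ws : List String) (acc : Int) :
    ws.foldl (fun score i =>
      let count : Int := i.toList.foldl (fun count j => if is_vowel j then count + 1 else count) 0
      if PySem.Int.mod count 2 == 0 then score + 2 else score + 1) acc
    = acc + (ws.map (fun w => if PySem.Int.mod (w.toList.countP is_vowel : Int) 2 == 0 then (2:Int) else 1)).sum := by
  induction ws generalizing acc with
  | nil => simp
  | cons w t ih =>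
    simp only [List.foldl_cons, List.map_cons, List.sum_cons]
    rw [ih, PySem.List.foldl_if_add_one]
    ring_nf
    split <;> ring

lemma per_word (n : Nat) :
    (if PySem.Int.mod (n : Int) 2 == 0 then (2 : Int) else 1) = 2 - PySem.Int.mod (n : Int) 2 := by
  have hm : PySem.Int.mod (n : Int) 2 = (n : Int) % 2 := PySem.Int.mod_eq_emod_of_pos (by norm_num)
  rw [hm]
  rcases Int.emod_two_eq_zero_or_one (n : Int) with h|h <;> simp [h]

lemma sum_two_sub (l : List Int) : (l.map (fun m => 2 - m)).sum = 2 * l.length - l.sum := by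
  induction l with
  | nil => simp
  | cons a t ih => simp [ih]; ring

-- ===== VERDICT (by name: the statement is the Claim_ definition above) =====
theorem score_words_spec : Claim_equal_score_words := by
  intro words _
  unfold Spec_score_words score_words score_words_alt
  rw [score_words_foldl]
  simp only [vowelSum_eq, zero_add, per_word]
  simpa [List.map_map, Function.comp, List.length_map] using
    sum_two_sub (words.map (fun w => PySem.Int.mod ((w.toList.countP is_vowel : Nat) : Int) 2))
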